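-- pv_equiv track=rewrite | github.com/gmikio/ProgrammingQuestions | Interviews/Brex/Phase1/Q2.py | solution
-- ===== SOURCE A (Python) =====
-- def solution(nums):
--     def cyclicTShift(nums, t):
--         return nums[t:] + nums[:t]
--
--     def isSorted(lst):
--         for i in range (1, len(lst)):
--             if lst[i] < lst[i-1]:
--                 return False
--         return True
--
--     numberT = -1
--     n = len(nums)
--
--     for t in range (n):
--         if isSorted(cyclicTShift(nums, t)):
--             numberT = t
--
--     return numberT
-- ===== SOURCE B (Python) =====
-- def solution(nums):
--     n = len(nums)
--     if n == 0:
--         return -1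
--     descents = [i for i in range(1, n) if nums[i] < nums[i - 1]]
--     wrap_ok = nums[-1] <= nums[0]
--     if not descents:
--         return n - 1 if wrap_ok else 0
--     if len(descents) == 1 and wrap_ok:
--         return descents[0]
--     return -1
-- ===== Notes on version B (the rewrite author's own statement) =====
-- stated objective: faster
-- what changed: Instead of generating every rotation and re-scanning it for sortedness, B makes one pass collecting the descent positions (places where an element is smaller than its predecessor) plus one last-vs-first wrap comparison, and reads the answer off the number of descents: none means n-1 when the wrap comparison holds else 0; exactly one with the wrap holding means that position; otherwise no valid rotation.
import Mathlib
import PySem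

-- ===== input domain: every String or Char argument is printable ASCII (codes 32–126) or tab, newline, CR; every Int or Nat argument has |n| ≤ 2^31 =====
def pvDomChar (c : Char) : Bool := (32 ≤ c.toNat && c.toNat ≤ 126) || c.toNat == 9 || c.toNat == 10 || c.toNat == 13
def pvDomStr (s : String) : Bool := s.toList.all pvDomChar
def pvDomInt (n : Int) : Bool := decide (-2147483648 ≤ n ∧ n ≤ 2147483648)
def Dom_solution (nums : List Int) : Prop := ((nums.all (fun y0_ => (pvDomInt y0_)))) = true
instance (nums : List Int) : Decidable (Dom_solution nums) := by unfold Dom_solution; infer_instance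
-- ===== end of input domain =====

-- B replaces A's scan of all n rotations (each re-checked for sortedness) by a single pass collecting descent positions.

-- ===== PORT A =====
-- helper cyclicTShift: nums[t:] + nums[:t]
def pvShift (nums : List Int) (t : Int) : List Int :=
  PySem.List.slice nums (some t) none ++ PySem.List.slice nums none (some t)

-- helper isSorted: for i in range(1, len(lst)): if lst[i] < lst[i-1]: return False; return True
def pvIsSorted (lst : List Int) : Bool :=
  (PySem.List.pyRange 1 (lst.length : Int) 1).all
    (fun i => !decide (PySem.List.pyGetD lst i 0 < PySem.List.pyGetD lst (i - 1) 0))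

def solution (nums : List Int) : Int :=
  (PySem.List.pyRange 0 (nums.length : Int) 1).foldl
    (fun numberT t => if pvIsSorted (pvShift nums t) then t else numberT) (-1)

-- ===== PORT B =====
def solution_alt (nums : List Int) : Int :=
  let n : Int := (nums.length : Int)
  if n = 0 then -1
  else
    let descents : List Int := (PySem.List.pyRange 1 n 1).filter
      (fun i => decide (PySem.List.pyGetD nums i 0 < PySem.List.pyGetD nums (i - 1) 0))
    let wrapOk : Bool := decide (PySem.List.pyGetD nums (-1) 0 ≤ PySem.List.pyGetD nums 0 0)
    if descents.isEmpty then (if wrapOk then n - 1 else 0)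
    else if descents.length = 1 ∧ wrapOk then PySem.List.pyGetD descents 0 0
    else -1

-- ===== PRECONDITION & SPEC =====
def Spec_solution (nums : List Int) (out : Int) : Prop := out = solution_alt nums
instance (nums : List Int) (out : Int) : Decidable (Spec_solution nums out) := by unfold Spec_solution; infer_instance

-- ===== CLAIM (what is proved, stated in full; the proofs are below) =====
def Claim_equal_solution : Prop := ∀ (nums : List Int), Dom_solution nums → Spec_solution nums (solution nums)

-- ===== LEMMAS AND PROOFS =====

-- A's loop keeps the LAST index passing the test: it is the last element of the filtered list.
theorem foldl_pick (p : Int → Bool) (l : List Int) (a : Int) :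
    l.foldl (fun acc t => if p t then t else acc) a = ((l.filter p).getLast?).getD a := by
  induction l generalizing a with
  | nil => rfl
  | cons x l ih =>
    simp only [List.foldl_cons, List.filter_cons]
    by_cases hx : p x
    · rw [if_pos hx, if_pos hx, ih]
      cases hfl : l.filter p with
      | nil => simp
      | cons y m => simp [List.getLast?_eq_some_getLast (List.cons_ne_nil y m)]
    · rw [if_neg hx, if_neg hx, ih]

-- A's isSorted is exactly chained ≤
theorem pvIsSorted_iff (l : List Int) : pvIsSorted l = true ↔ List.IsChain (· ≤ ·) l := by
  rw [pvIsSorted, List.all_eq_true, List.isChain_iff_getElem]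
  constructor
  · intro H i hi
    have h := H ((i+1 : Nat) : Int) (PySem.List.mem_pyRange_one.2 ⟨by omega, by exact_mod_cast hi⟩)
    simp only [show ((i+1 : Nat) : Int) - 1 = (i : Int) by push_cast; ring,
      PySem.List.pyGetD_natCast, Bool.not_eq_eq_eq_not, Bool.not_true, decide_eq_false_iff_not,
      not_lt] at h
    rwa [List.getD_eq_getElem _ _ (by omega), List.getD_eq_getElem _ _ hi] at h
  · intro H i hi
    obtain ⟨h1, h2⟩ := PySem.List.mem_pyRange_one.1 hi
    obtain ⟨j, rfl⟩ : ∃ j : Nat, i = (j : Int) := ⟨i.toNat, by omega⟩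
    have hj1 : 1 ≤ j := by exact_mod_cast h1
    have hj2 : j < l.length := by exact_mod_cast h2
    simp only [show ((j : Int)) - 1 = ((j-1 : Nat) : Int) by omega, PySem.List.pyGetD_natCast,
      Bool.not_eq_eq_eq_not, Bool.not_true, decide_eq_false_iff_not, not_lt]
    rw [List.getD_eq_getElem _ _ (by omega), List.getD_eq_getElem _ _ hj2]
    have := H (j-1) (by omega)
    simpa only [show j - 1 + 1 = j from by omega] using this

-- sortedness of the rotation by k, characterized by the descents of the original list
theorem rotChain_iff (l : List Int) (k : Nat) (hk : k < l.length) :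
    List.IsChain (· ≤ ·) (l.drop k ++ l.take k) ↔
      ((∀ i : Nat, 0 < i → i < l.length → i ≠ k → l.getD (i - 1) 0 ≤ l.getD i 0) ∧
       (0 < k → l.getD (l.length - 1) 0 ≤ l.getD 0 0)) := by
  have hne : l ≠ [] := by intro h; subst h; simp at hk
  rw [List.isChain_append, List.isChain_iff_getElem, List.isChain_iff_getElem]
  simp only [List.length_drop, List.length_take, List.getElem_drop, List.getElem_take,
    List.getLast?_drop, List.head?_take, if_neg (by omega : ¬ l.length ≤ k),
    List.getLast?_eq_some_getLast hne, List.head?_eq_some_head hne, Option.mem_def]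
  constructor
  · rintro ⟨C1, C2, C3⟩
    constructor
    · intro i hi0 hin hik
      rw [List.getD_eq_getElem _ _ (by omega), List.getD_eq_getElem _ _ hin]
      by_cases hlt : i < k
      · have h2 := C2 (i-1) (by omega)
        simpa only [show i - 1 + 1 = i from by omega] using h2
      · have h1 := C1 (i-1-k) (by omega)
        simpa only [show k + (i-1-k) = i - 1 from by omega,
          show k + (i-1-k+1) = i from by omega] using h1
    · intro hk0
      rw [List.getD_eq_getElem _ _ (by omega), List.getD_eq_getElem _ _ (by omega)]
      have := C3 (l.getLast hne) rfl (l.head hne) (by rw [if_neg (by omega)])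
      simpa only [List.getLast_eq_getElem, List.head_eq_getElem] using this
  · rintro ⟨R1, R2⟩
    refine ⟨?_, ?_, ?_⟩
    · intro i hi
      have := R1 (k+i+1) (by omega) (by omega) (by omega)
      rw [List.getD_eq_getElem _ _ (by omega), List.getD_eq_getElem _ _ (by omega)] at this
      simpa only [show k + i + 1 - 1 = k + i from by omega] using this
    · intro i hi
      have := R1 (i+1) (by omega) (by omega) (by omega)
      rw [List.getD_eq_getElem _ _ (by omega), List.getD_eq_getElem _ _ (by omega)] at this
      simpa only [show i + 1 - 1 = i from by omega] using this
    · intro x hx y hy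
      by_cases hk0 : k = 0
      · rw [if_pos hk0] at hy; simp at hy
      · rw [if_neg hk0] at hy
        have := R2 (by omega)
        rw [List.getD_eq_getElem _ _ (by omega), List.getD_eq_getElem _ _ (by omega)] at this
        cases hx; cases hy
        simpa only [List.getLast_eq_getElem, List.head_eq_getElem] using this

-- on a duplicate-free list, filtering for one known member keeps exactly it
theorem filter_beq_nodup (l : List Int) (a : Int) (h : l.Nodup) (ha : a ∈ l) :
    l.filter (· == a) = [a] := by
  induction l with
  | nil => simp at ha
  | cons x t ih =>
    simp only [List.filter_cons]
    rcases List.mem_cons.1 ha with rfl | hat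
    · rw [if_pos (by simp)]
      have : t.filter (· == a) = [] := by
        rw [List.filter_eq_nil_iff]
        intro b hb
        simp only [beq_iff_eq]
        rintro rfl
        exact (List.nodup_cons.1 h).1 hb
      simp [this]
    · rw [if_neg (by simp; rintro rfl; exact (List.nodup_cons.1 h).1 hat)]
      exact ih (List.nodup_cons.1 h).2 hat

theorem solution_eq_alt (nums : List Int) : solution nums = solution_alt nums := by
  rcases eq_or_ne nums [] with rfl | hne0
  · rfl
  have hn : 0 < nums.length := List.length_pos_iff.2 hne0
  -- bridge: A's shift of a nonnegative index is drop ++ take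
  have hshift : ∀ k : Nat, pvShift nums (k : Int) = nums.drop k ++ nums.take k := by
    intro k
    rw [pvShift, PySem.List.slice_from_natCast, PySem.List.slice_to_natCast]
  -- characterization of A's per-rotation test
  have hP : ∀ k : Nat, k < nums.length →
      (pvIsSorted (pvShift nums (k : Int)) = true ↔
        ((∀ i : Nat, 0 < i → i < nums.length → i ≠ k → nums.getD (i-1) 0 ≤ nums.getD i 0) ∧
         (0 < k → nums.getD (nums.length - 1) 0 ≤ nums.getD 0 0))) := by
    intro k hk
    rw [hshift, pvIsSorted_iff, rotChain_iff nums k hk]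
  -- bridge: B's descent test at a cast index
  have hDesc : ∀ j : Nat, 0 < j → j < nums.length →
      ((decide (PySem.List.pyGetD nums (j : Int) 0 < PySem.List.pyGetD nums ((j : Int) - 1) 0) = true) ↔
        ¬ (nums.getD (j-1) 0 ≤ nums.getD j 0)) := by
    intro j h0 hj
    simp only [show ((j : Int)) - 1 = ((j-1 : Nat) : Int) by omega, PySem.List.pyGetD_natCast,
      decide_eq_true_eq]
    exact not_le.symm
  -- bridge: B's wrap test
  have hwrap : (PySem.List.pyGetD nums (-1) 0 ≤ PySem.List.pyGetD nums 0 0) ↔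
      (nums.getD (nums.length - 1) 0 ≤ nums.getD 0 0) := by
    rw [PySem.List.pyGetD_neg_one nums 0 hne0, PySem.List.pyGetD_zero,
      List.getLast_eq_getElem, List.getD_eq_getElem _ _ (by omega : nums.length - 1 < nums.length)]
  rw [solution, foldl_pick]
  rcases hDc : (PySem.List.pyRange 1 (nums.length : Int) 1).filter
      (fun i => decide (PySem.List.pyGetD nums i 0 < PySem.List.pyGetD nums (i - 1) 0)) with _ | ⟨d, D'⟩
  -- ===== no descent =====
  · have hnod : ∀ i : Nat, 0 < i → i < nums.length → nums.getD (i-1) 0 ≤ nums.getD i 0 := by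
      intro i h0 hi
      by_contra hcon
      have hmem : (i : Int) ∈ (PySem.List.pyRange 1 (nums.length : Int) 1).filter
          (fun i => decide (PySem.List.pyGetD nums i 0 < PySem.List.pyGetD nums (i - 1) 0)) :=
        List.mem_filter.2 ⟨PySem.List.mem_pyRange_one.2 ⟨by omega, by omega⟩,
          (hDesc i h0 hi).2 hcon⟩
      rw [hDc] at hmem
      simp at hmem
    by_cases hw : nums.getD (nums.length - 1) 0 ≤ nums.getD 0 0
    · -- every rotation is sorted: A returns n-1
      have hfilt : (PySem.List.pyRange 0 (nums.length : Int) 1).filter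
          (fun t => pvIsSorted (pvShift nums t)) = PySem.List.pyRange 0 (nums.length : Int) 1 := by
        rw [List.filter_eq_self]
        intro t ht
        obtain ⟨h1, h2⟩ := PySem.List.mem_pyRange_one.1 ht
        obtain ⟨k, rfl⟩ : ∃ k : Nat, t = (k : Int) := ⟨t.toNat, by omega⟩
        exact (hP k (by omega)).2 ⟨fun i a b _ => hnod i a b, fun _ => hw⟩
      rw [hfilt]
      have hsplit : PySem.List.pyRange 0 ((nums.length : Int)) 1 =
          PySem.List.pyRange 0 ((nums.length : Int) - 1) 1 ++ [(nums.length : Int) - 1] := by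
        have h := PySem.List.pyRange_one_succ_right (a := 0) (b := (nums.length : Int) - 1) (by omega)
        rw [show ((nums.length : Int) - 1) + 1 = (nums.length : Int) by ring] at h
        exact h
      rw [hsplit, List.getLast?_concat]
      simp only [solution_alt]
      rw [if_neg (by omega : ¬ ((nums.length : Int) = 0)), hDc]
      rw [if_pos (by simp), if_pos (decide_eq_true (hwrap.2 hw))]
      rfl
    · -- only the identity rotation is sorted: A returns 0
      have h0 : pvIsSorted (pvShift nums ((0 : Nat) : Int)) = true :=
        (hP 0 hn).2 ⟨fun i a b _ => hnod i a b, fun h => absurd h (by omega)⟩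
      have hfilt : (PySem.List.pyRange 0 (nums.length : Int) 1).filter
          (fun t => pvIsSorted (pvShift nums t)) = [0] := by
        rw [PySem.List.pyRange_one_cons (by omega : (0:Int) < (nums.length : Int)), List.filter_cons,
          if_pos (by exact_mod_cast h0)]
        have : (PySem.List.pyRange (0+1) (nums.length : Int) 1).filter
            (fun t => pvIsSorted (pvShift nums t)) = [] := by
          rw [List.filter_eq_nil_iff]
          intro t ht
          obtain ⟨h1, h2⟩ := PySem.List.mem_pyRange_one.1 ht
          obtain ⟨k, rfl⟩ : ∃ k : Nat, t = (k : Int) := ⟨t.toNat, by omega⟩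
          simp only [Bool.not_eq_true]
          rw [← Bool.not_eq_true]
          intro habs
          exact hw (((hP k (by omega)).1 habs).2 (by omega))
        rw [this]
      rw [hfilt]
      simp only [solution_alt]
      rw [if_neg (by omega : ¬ ((nums.length : Int) = 0)), hDc]
      rw [if_pos (by simp), if_neg (by simp only [decide_eq_true_eq]; exact fun h => hw (hwrap.1 h))]
      rfl
  -- ===== at least one descent =====
  · have hd : d ∈ (PySem.List.pyRange 1 (nums.length : Int) 1) ∧ _ :=
      List.mem_filter.1 (by rw [hDc]; exact List.mem_cons_self)
    obtain ⟨hdr, hdP⟩ := hd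
    obtain ⟨hd1, hd2⟩ := PySem.List.mem_pyRange_one.1 hdr
    obtain ⟨dn, rfl⟩ : ∃ k : Nat, d = (k : Int) := ⟨d.toNat, by omega⟩
    have hdn1 : 0 < dn := by exact_mod_cast hd1
    have hdn2 : dn < nums.length := by exact_mod_cast hd2
    have hdDesc : ¬ (nums.getD (dn-1) 0 ≤ nums.getD dn 0) := (hDesc dn hdn1 hdn2).1 hdP
    rcases D' with _ | ⟨d2, D''⟩
    -- ===== exactly one descent =====
    · have huniq : ∀ i : Nat, 0 < i → i < nums.length → i ≠ dn → nums.getD (i-1) 0 ≤ nums.getD i 0 := by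
        intro i h0 hi hne
        by_contra hcon
        have hmem : (i : Int) ∈ (PySem.List.pyRange 1 (nums.length : Int) 1).filter
            (fun i => decide (PySem.List.pyGetD nums i 0 < PySem.List.pyGetD nums (i - 1) 0)) :=
          List.mem_filter.2 ⟨PySem.List.mem_pyRange_one.2 ⟨by omega, by omega⟩,
            (hDesc i h0 hi).2 hcon⟩
        rw [hDc] at hmem
        simp at hmem
        omega
      have hPk : ∀ k : Nat, k < nums.length →
          (pvIsSorted (pvShift nums (k : Int)) = true ↔
            (k = dn ∧ nums.getD (nums.length - 1) 0 ≤ nums.getD 0 0)) := by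
        intro k hk
        rw [hP k hk]
        constructor
        · rintro ⟨C1, C2⟩
          by_cases hkd : k = dn
          · exact ⟨hkd, C2 (by omega)⟩
          · exact absurd (C1 dn hdn1 hdn2 (fun h => hkd h.symm)) hdDesc
        · rintro ⟨rfl, hw⟩
          exact ⟨fun i a b c => huniq i a b c, fun _ => hw⟩
      by_cases hw : nums.getD (nums.length - 1) 0 ≤ nums.getD 0 0
      · have hfilt : (PySem.List.pyRange 0 (nums.length : Int) 1).filter
            (fun t => pvIsSorted (pvShift nums t)) = [(dn : Int)] := by
          rw [List.filter_congr (q := (· == ((dn : Nat) : Int)))]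
          · exact filter_beq_nodup _ _ (PySem.List.nodup_pyRange_one _ _)
              (PySem.List.mem_pyRange_one.2 ⟨by omega, by omega⟩)
          · intro t ht
            obtain ⟨h1, h2⟩ := PySem.List.mem_pyRange_one.1 ht
            obtain ⟨k, rfl⟩ : ∃ k : Nat, t = (k : Int) := ⟨t.toNat, by omega⟩
            rw [Bool.eq_iff_iff, hPk k (by omega)]
            simp only [beq_iff_eq, Nat.cast_inj]
            exact ⟨fun h => h.1, fun h => ⟨h, hw⟩⟩
        rw [hfilt]
        simp only [solution_alt]
        rw [if_neg (by omega : ¬ ((nums.length : Int) = 0)), hDc]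
        rw [if_neg (by simp), if_pos ⟨by simp, decide_eq_true (hwrap.2 hw)⟩,
          PySem.List.pyGetD_zero_cons]
        rfl
      · have hfilt : (PySem.List.pyRange 0 (nums.length : Int) 1).filter
            (fun t => pvIsSorted (pvShift nums t)) = [] := by
          rw [List.filter_eq_nil_iff]
          intro t ht
          obtain ⟨h1, h2⟩ := PySem.List.mem_pyRange_one.1 ht
          obtain ⟨k, rfl⟩ : ∃ k : Nat, t = (k : Int) := ⟨t.toNat, by omega⟩
          simp only [Bool.not_eq_true]
          rw [← Bool.not_eq_true]
          intro habs
          exact hw ((hPk k (by omega)).1 habs).2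
        rw [hfilt]
        simp only [solution_alt]
        rw [if_neg (by omega : ¬ ((nums.length : Int) = 0)), hDc]
        rw [if_neg (by simp), if_neg (by rintro ⟨-, hwb⟩; exact hw (hwrap.1 (of_decide_eq_true hwb)))]
        rfl
    -- ===== two or more descents =====
    · have hnodup : ((dn : Int) :: d2 :: D'').Nodup := by
        rw [← hDc]
        exact List.Nodup.filter _ (PySem.List.nodup_pyRange_one _ _)
      have hne12 : (dn : Int) ≠ d2 := by
        have := List.nodup_cons.1 hnodup
        intro h
        exact this.1 (h ▸ List.mem_cons_self)
      have hd2f : d2 ∈ (PySem.List.pyRange 1 (nums.length : Int) 1).filter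
          (fun i => decide (PySem.List.pyGetD nums i 0 < PySem.List.pyGetD nums (i - 1) 0)) := by
        rw [hDc]; exact List.mem_cons.2 (Or.inr List.mem_cons_self)
      obtain ⟨hd2r, hd2P⟩ := List.mem_filter.1 hd2f
      obtain ⟨h21, h22⟩ := PySem.List.mem_pyRange_one.1 hd2r
      obtain ⟨en, rfl⟩ : ∃ k : Nat, d2 = (k : Int) := ⟨d2.toNat, by omega⟩
      have hen1 : 0 < en := by exact_mod_cast h21
      have hen2 : en < nums.length := by exact_mod_cast h22
      have henDesc : ¬ (nums.getD (en-1) 0 ≤ nums.getD en 0) := (hDesc en hen1 hen2).1 hd2P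
      have hfilt : (PySem.List.pyRange 0 (nums.length : Int) 1).filter
          (fun t => pvIsSorted (pvShift nums t)) = [] := by
        rw [List.filter_eq_nil_iff]
        intro t ht
        obtain ⟨h1, h2⟩ := PySem.List.mem_pyRange_one.1 ht
        obtain ⟨k, rfl⟩ : ∃ k : Nat, t = (k : Int) := ⟨t.toNat, by omega⟩
        simp only [Bool.not_eq_true]
        rw [← Bool.not_eq_true]
        intro habs
        obtain ⟨C1, _⟩ := (hP k (by omega)).1 habs
        by_cases hkd : k = dn
        · exact henDesc (C1 en hen1 hen2 (by omega))
        · exact hdDesc (C1 dn hdn1 hdn2 (Ne.symm hkd))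
      rw [hfilt]
      simp only [solution_alt]
      rw [if_neg (by omega : ¬ ((nums.length : Int) = 0)), hDc]
      rw [if_neg (by simp), if_neg (by rintro ⟨hl, -⟩; simp at hl)]
      rfl


-- ===== VERDICT (by name: the statement is the Claim_ definition above) =====
theorem solution_spec : Claim_equal_solution := by
  intro nums _
  show solution nums = solution_alt nums
  exact solution_eq_alt nums
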